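-- pv_equiv track=rewrite | github.com/sangwoo7957/Algorithm | Baekjun2447.py | solution
-- ===== SOURCE A (Python) =====
-- def solution(n):
--     matrix = []
--     for i in range(3 * len(n)):
--         if i // len(n) == 1:
--             matrix.append(n[i % len(n)] + " " * len(n) + n[i % len(n)])
--         else:
--             matrix.append(n[i % len(n)] * 3)
--     return list(matrix)
-- ===== SOURCE B (Python) =====
-- def solution(n):
--     top = [s * 3 for s in n]
--     mid = [s + " " * len(n) + s for s in n]
--     return top + mid + top
-- ===== Notes on version B (the rewrite author's own statement) =====
-- stated objective: simpler
-- what changed: Replaces the single range(3*len(n)) loop with i//len(n) branching and modular indexing by three direct comprehensions over n concatenated as top + mid + top.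
import Mathlib
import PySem

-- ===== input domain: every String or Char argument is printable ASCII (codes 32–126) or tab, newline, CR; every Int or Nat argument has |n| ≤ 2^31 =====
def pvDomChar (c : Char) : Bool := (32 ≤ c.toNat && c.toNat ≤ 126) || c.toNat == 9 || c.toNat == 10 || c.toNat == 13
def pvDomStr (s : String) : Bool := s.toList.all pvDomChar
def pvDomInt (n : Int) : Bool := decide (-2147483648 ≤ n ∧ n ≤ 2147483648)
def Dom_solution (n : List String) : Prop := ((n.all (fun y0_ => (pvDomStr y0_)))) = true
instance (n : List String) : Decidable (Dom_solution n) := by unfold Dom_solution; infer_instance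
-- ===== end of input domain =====

-- B builds the output as three comprehensions top + mid + top instead of one
-- range(3*len(n)) loop with //- and %-indexing (objective: simpler).


-- ===== PORT A =====
-- n[i % len(n)] is always in range here, so pyGetD with default "" is exact.
def solution (n : List String) : List String :=
  (PySem.List.pyRange 0 (3 * (n.length : Int)) 1).foldl
    (fun matrix i =>
      if PySem.Int.floordiv i (n.length : Int) = 1 then
        matrix ++ [PySem.List.pyGetD n (PySem.Int.mod i (n.length : Int)) "" ++
                   String.ofList (List.replicate n.length ' ') ++
                   PySem.List.pyGetD n (PySem.Int.mod i (n.length : Int)) ""]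
      else
        matrix ++ [PySem.List.pyGetD n (PySem.Int.mod i (n.length : Int)) "" ++
                   PySem.List.pyGetD n (PySem.Int.mod i (n.length : Int)) "" ++
                   PySem.List.pyGetD n (PySem.Int.mod i (n.length : Int)) ""])
    []

-- ===== PORT B =====
def solution_alt (n : List String) : List String :=
  n.map (fun s => s ++ s ++ s) ++
  n.map (fun s => s ++ String.ofList (List.replicate n.length ' ') ++ s) ++
  n.map (fun s => s ++ s ++ s)

-- ===== PRECONDITION & SPEC =====
def Spec_solution (n : List String) (out : List String) : Prop := out = solution_alt n
instance (n : List String) (out : List String) : Decidable (Spec_solution n out) := by unfold Spec_solution; infer_instance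

-- ===== CLAIM (what is proved, stated in full; the proofs are below) =====
def Claim_equal_solution : Prop := ∀ (n : List String), Dom_solution n → Spec_solution n (solution n)

-- ===== LEMMAS AND PROOFS =====

-- one third of the range: indices c*k … c*k+k-1 hit exactly n, in order
theorem pv_block (n : List String) (c : Nat) (F : String → String) :
    (PySem.List.pyRange ((c : Int) * n.length) ((c : Int) * n.length + n.length) 1).map
      (fun i => F (PySem.List.pyGetD n (PySem.Int.mod i (n.length : Int)) "")) = n.map F := by
  rw [PySem.List.pyRange_one]
  have hl : (((c : Int) * n.length + n.length) - (c : Int) * n.length).toNat = n.length := by omega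
  rw [hl]
  apply List.ext_getElem
  · simp
  · intro j hj hj'
    simp only [List.getElem_map, List.getElem_range]
    have hk : 0 < (n.length : Int) := by simp at hj; omega
    have hjlen : j < n.length := by simpa using hj'
    have hm : PySem.Int.mod ((c : Int) * n.length + j) (n.length : Int) = (j : Int) := by
      rw [PySem.Int.mod_eq_emod_of_pos hk, add_comm, Int.add_mul_emod_self_right]
      exact Int.emod_eq_of_lt (by omega) (by omega)
    rw [hm]
    rw [PySem.List.pyGetD_natCast, List.getD_eq_getElem _ _ hjlen]

theorem pv_floordiv_block (i k : Int) (c : Int) (hk : 0 < k) (h1 : c * k ≤ i) (h2 : i < c * k + k) :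
    PySem.Int.floordiv i k = c := by
  exact (PySem.Int.floordiv_eq_iff_of_pos hk).mpr ⟨h1, by nlinarith⟩

-- ===== VERDICT (by name: the statement is the Claim_ definition above) =====
theorem solution_spec : Claim_equal_solution := by
  intro n _
  show solution n = solution_alt n
  rcases eq_or_ne n [] with hnil | hne
  · subst hnil; rfl
  · have hk : 0 < (n.length : Int) := by
      have := List.length_pos_iff.mpr hne; omega
    unfold solution
    have hbody : (fun (matrix : List String) (i : Int) =>
        if PySem.Int.floordiv i (n.length : Int) = 1 then
          matrix ++ [PySem.List.pyGetD n (PySem.Int.mod i (n.length : Int)) "" ++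
                     String.ofList (List.replicate n.length ' ') ++
                     PySem.List.pyGetD n (PySem.Int.mod i (n.length : Int)) ""]
        else
          matrix ++ [PySem.List.pyGetD n (PySem.Int.mod i (n.length : Int)) "" ++
                     PySem.List.pyGetD n (PySem.Int.mod i (n.length : Int)) "" ++
                     PySem.List.pyGetD n (PySem.Int.mod i (n.length : Int)) ""]) =
        (fun matrix i => matrix ++
          [if PySem.Int.floordiv i (n.length : Int) = 1 then
             PySem.List.pyGetD n (PySem.Int.mod i (n.length : Int)) "" ++
             String.ofList (List.replicate n.length ' ') ++
             PySem.List.pyGetD n (PySem.Int.mod i (n.length : Int)) ""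
           else
             PySem.List.pyGetD n (PySem.Int.mod i (n.length : Int)) "" ++
             PySem.List.pyGetD n (PySem.Int.mod i (n.length : Int)) "" ++
             PySem.List.pyGetD n (PySem.Int.mod i (n.length : Int)) ""]) := by
      funext m i; split <;> rfl
    rw [hbody, PySem.List.foldl_append_singleton_eq_map, List.nil_append]
    rw [PySem.List.pyRange_one_append 0 (n.length : Int) (3 * n.length) (by omega) (by omega),
        PySem.List.pyRange_one_append (n.length : Int) (2 * n.length) (3 * n.length) (by omega) (by omega)]
    rw [List.map_append, List.map_append]
    unfold solution_alt
    rw [← List.append_assoc]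
    refine congrArg₂ (· ++ ·) (congrArg₂ (· ++ ·) ?_ ?_) ?_
    · -- first block: i ∈ [0, k), floordiv = 0 ≠ 1
      have hb := pv_block n 0 (fun s => s ++ s ++ s)
      simp only [Nat.cast_zero, zero_mul, zero_add] at hb
      rw [← hb]
      apply List.map_congr_left
      intro i hi
      rw [PySem.List.mem_pyRange_one] at hi
      rw [pv_floordiv_block i _ 0 hk (by omega) (by omega)]
      simp
    · -- middle block: i ∈ [k, 2k), floordiv = 1
      have hb := pv_block n 1 (fun s => s ++ String.ofList (List.replicate n.length ' ') ++ s)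
      simp only [Nat.cast_one, one_mul] at hb
      rw [show (2 : Int) * (n.length : Int) = (n.length : Int) + n.length from by ring, ← hb]
      apply List.map_congr_left
      intro i hi
      rw [PySem.List.mem_pyRange_one] at hi
      rw [pv_floordiv_block i _ 1 hk (by omega) (by omega)]
      simp
    · -- last block: i ∈ [2k, 3k), floordiv = 2 ≠ 1
      have hb := pv_block n 2 (fun s => s ++ s ++ s)
      push_cast at hb
      rw [show (3 : Int) * (n.length : Int) = 2 * (n.length : Int) + n.length from by ring, ← hb]
      apply List.map_congr_left
      intro i hi
      rw [PySem.List.mem_pyRange_one] at hi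
      rw [pv_floordiv_block i _ 2 hk (by omega) (by omega)]
      simp
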